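-- pv_equiv track=rewrite | github.com/raspuchin/image_ocr_using_crnn | helper_classes/helper_functions.py | get_final_pred
-- ===== SOURCE A (Python) =====
-- def get_final_pred(text):
--     """Remove adjacent duplicate characters
--
--     Args:
--         text: Do argmax after crnn net ouput
--
--     Returns:
--         final_text: Text removed adjacent duplicate characters
--     """
--     text = list(text)
--     for i in range(len(text)):
--         for j in range(i + 1, len(text)):
--             if text[j] == ' ':
--                 break
--             else:
--                 if text[j] == text[i]:
--                     text[j] = ' '
--                 else:
--                     continue
--     final_text = ''.join(text).replace(' ', '')
--     return final_text
-- ===== SOURCE B (Python) =====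
-- def get_final_pred(text):
--     """Remove adjacent duplicate characters (single left-to-right pass).
--
--     Keeps a stack of the distinct characters still "active": a space clears
--     it; a repeat of an active character is dropped and pops everything pushed
--     above that character; any other character is kept and pushed.
--     """
--     out = []
--     stack = []
--     for ch in text:
--         if ch == ' ':
--             stack = []
--         elif ch in stack:
--             del stack[stack.index(ch) + 1:]
--         else:
--             stack.append(ch)
--             out.append(ch)
--     return ''.join(out)
-- ===== Notes on version B (the rewrite author's own statement) =====
-- stated objective: faster
-- what changed: Replaced the quadratic nested index loops that mark duplicates with spaces in a mutable list by a single left-to-right pass that maintains a stack of the distinct active characters (space clears it, a repeated active character is dropped and pops everything above its first occurrence).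
import Mathlib
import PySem

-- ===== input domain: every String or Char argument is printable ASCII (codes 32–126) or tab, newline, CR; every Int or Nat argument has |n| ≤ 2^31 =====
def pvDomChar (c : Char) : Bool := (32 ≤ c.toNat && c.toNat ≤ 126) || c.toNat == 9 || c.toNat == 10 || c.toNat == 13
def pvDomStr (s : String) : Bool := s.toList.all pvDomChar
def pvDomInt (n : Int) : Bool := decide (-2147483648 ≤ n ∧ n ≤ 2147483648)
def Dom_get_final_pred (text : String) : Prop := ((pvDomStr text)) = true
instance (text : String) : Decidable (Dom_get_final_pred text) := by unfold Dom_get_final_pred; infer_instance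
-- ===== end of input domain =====

-- B replaces A's quadratic nested marking loops by one left-to-right pass with a stack of active distinct characters (objective: faster).

-- ===== PORT A =====
-- inner loop: for j in range(i+1, len(text)): break at ' ', mark duplicates of text[i] as ' '
def pvInnerA (t : List Char) (i : Nat) : List Nat → List Char
  | [] => t
  | j :: js =>
    if t.getD j ' ' = ' ' then t
    else if t.getD j ' ' = t.getD i ' ' then pvInnerA (t.set j ' ') i js
    else pvInnerA t i js

-- outer loop: for i in range(len(text)) (the length never changes)
def pvOuterA (t : List Char) : List Nat → List Char
  | [] => t
  | i :: is => pvOuterA (pvInnerA t i (List.range' (i + 1) (t.length - (i + 1)))) is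

-- ''.join(text).replace(' ', '') applied to the mutated char list
def get_final_pred (text : String) : String :=
  PySem.Str.replace
    (String.ofList (PySem.Chars.join []
      ((pvOuterA text.toList (List.range text.toList.length)).map (fun c => [c])))) " " ""

-- ===== PORT B =====
-- one pass: a space clears the stack; a repeat of an active char is dropped and
-- pops everything above its first occurrence; otherwise keep the char and push it
def pvAltGo (stack : List Char) : List Char → List Char
  | [] => []
  | c :: cs =>
    if c = ' ' then pvAltGo [] cs
    else if c ∈ stack then pvAltGo (stack.take (stack.idxOf c + 1)) cs
    else c :: pvAltGo (stack ++ [c]) cs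

def get_final_pred_alt (text : String) : String :=
  String.ofList (pvAltGo [] text.toList)

-- ===== PRECONDITION & SPEC =====
def Spec_get_final_pred (text : String) (out : String) : Prop := out = get_final_pred_alt text
instance (text : String) (out : String) : Decidable (Spec_get_final_pred text out) := by unfold Spec_get_final_pred; infer_instance

-- ===== CLAIM (what is proved, stated in full; the proofs are below) =====
def Claim_equal_get_final_pred : Prop := ∀ (text : String), Dom_get_final_pred text → Spec_get_final_pred text (get_final_pred text)

-- ===== LEMMAS AND PROOFS =====

-- A's inner pass on the tail, as a structural function: mark duplicates of c as ' ' up to the first ' '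
def pvMark (c : Char) : List Char → List Char
  | [] => []
  | x :: xs => if x = ' ' then x :: xs else (if x = c then ' ' else x) :: pvMark c xs

theorem pvMark_length (c : Char) (l : List Char) : (pvMark c l).length = l.length := by
  induction l with
  | nil => rfl
  | cons x xs ih => simp only [pvMark]; split_ifs <;> simp [ih]

-- A's whole algorithm, head-first: process position 0, then recurse on the marked tail
def pvAarr : List Char → List Char
  | [] => []
  | c :: rest => c :: pvAarr (pvMark c rest)
termination_by l => l.length
decreasing_by simp [pvMark_length]

def pvMarkAll : List Char → List Char → List Char
  | [], l => l
  | s :: st, l => pvMarkAll st (pvMark s l)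

theorem pvMark_space (l : List Char) : pvMark ' ' l = l := by
  induction l with
  | nil => rfl
  | cons x xs ih => simp only [pvMark]; split_ifs <;> simp_all

theorem pvMarkAll_nil (stack : List Char) : pvMarkAll stack [] = [] := by
  induction stack with
  | nil => rfl
  | cons s st ih => simpa [pvMarkAll, pvMark] using ih

theorem pvMarkAll_space_cons (stack : List Char) (xs : List Char) :
    pvMarkAll stack (' ' :: xs) = ' ' :: xs := by
  induction stack with
  | nil => rfl
  | cons s st ih => simpa [pvMarkAll, pvMark] using ih

theorem pvMarkAll_cons_notmem (stack : List Char) (x : Char) (xs : List Char)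
    (hx : x ≠ ' ') (h : x ∉ stack) :
    pvMarkAll stack (x :: xs) = x :: pvMarkAll stack xs := by
  induction stack generalizing xs with
  | nil => rfl
  | cons s st ih =>
    have hxs : x ≠ s := by intro he; exact h (by simp [he])
    have h' : x ∉ st := fun hm => h (by simp [hm])
    simp only [pvMarkAll]
    rw [show pvMark s (x :: xs) = x :: pvMark s xs from by simp [pvMark, hx, hxs]]
    exact ih _ h'

theorem pvMarkAll_cons_mem (stack : List Char) (x : Char) (xs : List Char)
    (hx : x ≠ ' ') (h : x ∈ stack) :
    pvMarkAll stack (x :: xs) = ' ' :: pvMarkAll (stack.take (stack.idxOf x + 1)) xs := by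
  induction stack generalizing xs with
  | nil => simp at h
  | cons s st ih =>
    by_cases hs : s = x
    · subst hs
      simp only [pvMarkAll]
      rw [show pvMark s (s :: xs) = ' ' :: pvMark s xs from by simp [pvMark, hx]]
      rw [pvMarkAll_space_cons st (pvMark s xs)]
      simp [pvMarkAll]
    · have hxs : x ≠ s := fun he => hs he.symm
      have h' : x ∈ st := by cases h with
        | head => exact absurd rfl hs
        | tail _ hm => exact hm
      simp only [pvMarkAll]
      rw [show pvMark s (x :: xs) = x :: pvMark s xs from by simp [pvMark, hx, hxs]]
      rw [ih (pvMark s xs) h']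
      have hidx : (s :: st).idxOf x = st.idxOf x + 1 := by simp [hs]
      rw [hidx]
      simp [List.take_succ_cons, pvMarkAll]

theorem pvMarkAll_append_singleton (stack : List Char) (c : Char) (l : List Char) :
    pvMarkAll (stack ++ [c]) l = pvMark c (pvMarkAll stack l) := by
  induction stack generalizing l with
  | nil => rfl
  | cons s st ih => simp only [pvMarkAll, List.cons_append]; exact ih _

theorem pvAltGo_eq (l : List Char) : ∀ stack,
    pvAltGo stack l = (pvAarr (pvMarkAll stack l)).filter (· ≠ ' ') := by
  induction l with
  | nil => intro stack; simp [pvAltGo, pvMarkAll_nil, pvAarr]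
  | cons c cs ih =>
    intro stack
    by_cases hc : c = ' '
    · subst hc
      rw [show pvAltGo stack (' ' :: cs) = pvAltGo [] cs from by simp [pvAltGo]]
      rw [pvMarkAll_space_cons, pvAarr, pvMark_space]
      rw [ih []]
      simp [pvMarkAll]
    · by_cases hm : c ∈ stack
      · rw [show pvAltGo stack (c :: cs) = pvAltGo (stack.take (stack.idxOf c + 1)) cs from by
          simp [pvAltGo, hc, hm]]
        rw [pvMarkAll_cons_mem stack c cs hc hm, pvAarr, pvMark_space]
        rw [ih]
        simp
      · rw [show pvAltGo stack (c :: cs) = c :: pvAltGo (stack ++ [c]) cs from by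
          simp [pvAltGo, hc, hm]]
        rw [pvMarkAll_cons_notmem stack c cs hc hm, pvAarr, ← pvMarkAll_append_singleton]
        rw [ih]
        simp [hc]

theorem pvInnerA_eq (k : Nat) : ∀ (t : List Char) (i j : Nat), i < j → t.length - j = k →
    pvInnerA t i (List.range' j k) = t.take j ++ pvMark (t.getD i ' ') (t.drop j) := by
  induction k with
  | zero =>
    intro t i j _ hk
    have : t.length ≤ j := by omega
    simp [pvInnerA, List.drop_eq_nil_of_le this, List.take_of_length_le this, pvMark]
  | succ k ih =>
    intro t i j hij hk
    have hj : j < t.length := by omega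
    rw [List.range'_succ]
    have hget : t.getD j ' ' = t[j] := by
      simp [List.getD_eq_getElem?_getD, List.getElem?_eq_getElem hj]
    have hdrop : t.drop j = t[j] :: t.drop (j + 1) := List.drop_eq_getElem_cons hj
    have hunf : pvInnerA t i (j :: List.range' (j+1) k) =
        if t.getD j ' ' = ' ' then t
        else if t.getD j ' ' = t.getD i ' ' then pvInnerA (t.set j ' ') i (List.range' (j+1) k)
        else pvInnerA t i (List.range' (j+1) k) := rfl
    by_cases h1 : t[j] = ' '
    · rw [hunf, hget, if_pos h1, hdrop]
      rw [show pvMark (t.getD i ' ') (t[j] :: t.drop (j+1)) = t[j] :: t.drop (j+1) from by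
        simp [pvMark, h1]]
      rw [← hdrop, List.take_append_drop]
    · by_cases h2 : t[j] = t.getD i ' '
      · rw [hunf, hget, if_neg h1, if_pos h2]
        have hlen : (t.set j ' ').length - (j+1) = k := by simp; omega
        have hgi : (t.set j ' ').getD i ' ' = t.getD i ' ' := by
          simp [List.getD_eq_getElem?_getD, List.getElem?_set_ne (by omega : j ≠ i)]
        rw [ih (t.set j ' ') i (j+1) (by omega) hlen, hgi]
        have htk : (t.set j ' ').take (j+1) = t.take j ++ [' '] := by
          rw [List.set_eq_take_append_cons_drop, if_pos hj, List.take_append]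
          simp [List.length_take, Nat.min_eq_left (le_of_lt hj)]
        have hdr : (t.set j ' ').drop (j+1) = t.drop (j+1) := by
          rw [List.set_eq_take_append_cons_drop, if_pos hj, List.drop_append]
          simp [List.length_take, Nat.min_eq_left (le_of_lt hj)]
        rw [htk, hdr, hdrop]
        rw [show pvMark (t.getD i ' ') (t[j] :: t.drop (j+1)) =
            if t[j] = ' ' then t[j] :: t.drop (j+1)
            else (if t[j] = t.getD i ' ' then ' ' else t[j]) :: pvMark (t.getD i ' ') (t.drop (j+1))
          from rfl, if_neg h1, if_pos h2]
        simp
      · rw [hunf, hget, if_neg h1, if_neg h2]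
        rw [ih t i (j+1) (by omega) (by omega), hdrop]
        rw [show pvMark (t.getD i ' ') (t[j] :: t.drop (j+1)) =
            if t[j] = ' ' then t[j] :: t.drop (j+1)
            else (if t[j] = t.getD i ' ' then ' ' else t[j]) :: pvMark (t.getD i ' ') (t.drop (j+1))
          from rfl, if_neg h1, if_neg h2]
        have : t.take (j+1) = t.take j ++ [t[j]] := by
          rw [List.take_add_one, List.getElem?_eq_getElem hj]; rfl
        rw [this, List.append_assoc]
        rfl

theorem pvOuterA_eq (k : Nat) : ∀ (t : List Char) (i : Nat), t.length - i = k →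
    pvOuterA t (List.range' i k) = t.take i ++ pvAarr (t.drop i) := by
  induction k with
  | zero =>
    intro t i hk
    have : t.length ≤ i := by omega
    simp [pvOuterA, List.drop_eq_nil_of_le this, List.take_of_length_le this, pvAarr]
  | succ k ih =>
    intro t i hk
    have hi : i < t.length := by omega
    rw [List.range'_succ]
    simp only [pvOuterA]
    set ci := t.getD i ' ' with hci
    have h1 : pvInnerA t i (List.range' (i+1) (t.length - (i+1))) =
        t.take (i+1) ++ pvMark ci (t.drop (i+1)) :=
      pvInnerA_eq (t.length - (i+1)) t i (i+1) (by omega) rfl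
    rw [h1]
    set t1 := t.take (i+1) ++ pvMark ci (t.drop (i+1)) with ht1
    have hlen1 : t1.length = t.length := by
      simp [ht1, pvMark_length, List.length_take]; omega
    rw [ih t1 (i+1) (by omega)]
    have hlt : (t.take (i+1)).length = i + 1 := by simp; omega
    have htk : t1.take (i+1) = t.take (i+1) := by
      rw [ht1, List.take_append]
      simp [hlt]
    have hdr : t1.drop (i+1) = pvMark ci (t.drop (i+1)) := by
      rw [ht1, List.drop_append]
      simp [hlt]
    rw [htk, hdr]
    have hgi : ci = t[i] := by
      simp [hci, List.getD_eq_getElem?_getD, List.getElem?_eq_getElem hi]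
    have hdropi : t.drop i = t[i] :: t.drop (i+1) := List.drop_eq_getElem_cons hi
    rw [hdropi, pvAarr, ← hgi]
    have : t.take (i+1) = t.take i ++ [t[i]] := by
      rw [List.take_add_one, List.getElem?_eq_getElem hi]; rfl
    rw [this, hgi, List.append_assoc]
    rfl

-- replace(' ', '') with a one-char pattern and empty replacement is filter
theorem pvReplaceGo_eq (fuel : Nat) : ∀ (l acc : List Char), l.length ≤ fuel →
    PySem.Chars.replace.go [' '] [] fuel l acc = acc.reverse ++ l.filter (· ≠ ' ') := by
  induction fuel with
  | zero =>
    intro l acc h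
    have : l = [] := List.eq_nil_of_length_eq_zero (by omega)
    subst this
    simp [PySem.Chars.replace.go]
  | succ fuel ih =>
    intro l acc h
    cases l with
    | nil => simp [PySem.Chars.replace.go]
    | cons c t =>
      by_cases hc : c = ' '
      · subst hc
        rw [show PySem.Chars.replace.go [' '] [] (fuel+1) (' '::t) acc =
            PySem.Chars.replace.go [' '] [] fuel t acc from by
          simp [PySem.Chars.replace.go, List.isPrefixOf]]
        rw [ih t acc (by simpa using Nat.lt_succ_iff.mp (by simpa using h))]
        simp
      · rw [show PySem.Chars.replace.go [' '] [] (fuel+1) (c::t) acc =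
            PySem.Chars.replace.go [' '] [] fuel t (c :: acc) from by
          have hc' : ¬(' ' = c) := fun h => hc h.symm
          simp [PySem.Chars.replace.go, List.isPrefixOf, hc']]
        rw [ih t (c :: acc) (by simpa using Nat.lt_succ_iff.mp (by simpa using h))]
        simp [hc]

theorem pvReplace_space (l : List Char) :
    PySem.Chars.replace l [' '] [] = l.filter (· ≠ ' ') := by
  have h := pvReplaceGo_eq l.length l [] le_rfl
  simpa [PySem.Chars.replace] using h

-- ===== VERDICT (by name: the statement is the Claim_ definition above) =====
theorem get_final_pred_spec : Claim_equal_get_final_pred := by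
  intro text _
  unfold Spec_get_final_pred get_final_pred get_final_pred_alt
  rw [PySem.Chars.join_nil_singletons]
  rw [PySem.Str.replace]
  rw [show (String.ofList (pvOuterA text.toList (List.range text.toList.length))).toList =
      pvOuterA text.toList (List.range text.toList.length) from by simp]
  rw [show (" " : String).toList = [' '] from rfl, show ("" : String).toList = [] from rfl]
  rw [pvReplace_space]
  rw [List.range_eq_range']
  rw [pvOuterA_eq text.toList.length text.toList 0 (by omega)]
  rw [pvAltGo_eq text.toList []]
  rfl
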